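-- pv_equiv track=rewrite | github.com/seng499-company2/algorithm2 | src/forecaster/preprocessor.py | get_historical_term_codes
-- ===== SOURCE A (Python) =====
-- def get_historical_term_codes(course_enrollment: list) -> dict:
--     """ This function takes in the historical enrollments, counts up the
--     term-course offering codes (eg 201801) and separates them into three terms
--     fall, spring and summer"""
--     historical_term_codes = {'fall':[], 'spring': [], 'summer': []}
--
--     for course_term_offering in course_enrollment:
--         if course_term_offering['term'].endswith('09'):
--             historical_term_codes['fall']\
--             .append(course_term_offering['term'])
--         elif course_term_offering['term'].endswith('01'):
--             historical_term_codes['spring']\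
--             .append(course_term_offering['term'])
--         elif course_term_offering['term'].endswith('05'):
--             historical_term_codes['summer']\
--             .append(course_term_offering['term'])
--
--     for term in ('fall', 'spring', 'summer'):
--         historical_term_codes[term] = remove_dups(historical_term_codes[term])
--         historical_term_codes[term].sort()
--
--     return historical_term_codes
--
-- def remove_dups(input_list: list) -> list:
--     """ This function removes duplicates from a list and returns that list"""
--     return list(dict.fromkeys(input_list))
-- ===== SOURCE B (Python) =====
-- def get_historical_term_codes(course_enrollment: list) -> dict:
--     """Extract the term codes once, then build each season's bucket
--     independently: filter by suffix, dedupe, sort (staged per-bucket passes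
--     instead of A's single elif-chain accumulation loop)."""
--     terms = [e['term'] for e in course_enrollment]
--
--     def bucket(suffix):
--         return sorted(dict.fromkeys(t for t in terms if t.endswith(suffix)))
--
--     return {'fall': bucket('09'), 'spring': bucket('01'), 'summer': bucket('05')}
-- ===== Notes on version B (the rewrite author's own statement) =====
-- stated objective: alternative
-- what changed: B extracts the term list once and builds each season bucket independently by a per-suffix filter + dedupe + sort, replacing A's single accumulating elif-chain loop over entries followed by a per-bucket dedup/sort pass; correct because two distinct 2-char suffixes can never both end the same string, so the elif chain equals three independent filters.
import Mathlib
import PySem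

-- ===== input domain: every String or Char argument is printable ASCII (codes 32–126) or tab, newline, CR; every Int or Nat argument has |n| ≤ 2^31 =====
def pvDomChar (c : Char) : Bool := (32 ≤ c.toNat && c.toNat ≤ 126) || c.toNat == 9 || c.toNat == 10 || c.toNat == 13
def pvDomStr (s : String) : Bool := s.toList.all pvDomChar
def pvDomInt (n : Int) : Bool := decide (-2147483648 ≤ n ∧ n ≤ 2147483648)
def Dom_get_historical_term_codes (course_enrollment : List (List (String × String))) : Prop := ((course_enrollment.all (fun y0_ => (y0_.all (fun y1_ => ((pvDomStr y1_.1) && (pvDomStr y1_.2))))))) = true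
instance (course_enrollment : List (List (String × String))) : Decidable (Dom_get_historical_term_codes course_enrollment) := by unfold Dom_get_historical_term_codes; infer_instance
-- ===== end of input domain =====

-- B extracts the term list once and builds each season bucket independently (filter by suffix, dedupe, sort) instead of A's accumulating elif-chain loop; return value equal to A's.


-- ===== PORT A =====
-- e['term']: first-match lookup; Python raises KeyError when absent — those inputs are excluded by Pre_ (the "" default is never reached there)
def get_historical_term_codes (course_enrollment : List (List (String × String))) : List (String × List String) :=
  let buckets := course_enrollment.foldl (fun acc e =>
    let t := (PySem.Dict.mk e).getD "term" ""
    if PySem.Str.endswith t "09" then (acc.1 ++ [t], acc.2.1, acc.2.2)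
    else if PySem.Str.endswith t "01" then (acc.1, acc.2.1 ++ [t], acc.2.2)
    else if PySem.Str.endswith t "05" then (acc.1, acc.2.1, acc.2.2 ++ [t])
    else acc) ([], [], [])
  [("fall",   PySem.List.sorted (PySem.List.dedup buckets.1) (fun x => x) false),
   ("spring", PySem.List.sorted (PySem.List.dedup buckets.2.1) (fun x => x) false),
   ("summer", PySem.List.sorted (PySem.List.dedup buckets.2.2) (fun x => x) false)]

-- ===== PORT B =====
-- B's helper bucket(suffix): filter the extracted term list by suffix, dedupe, sort
def pvBucketAlt (terms : List String) (suffix : String) : List String :=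
  PySem.List.sorted
    (PySem.List.dedup (terms.filter (fun t => PySem.Str.endswith t suffix)))
    (fun x => x) false

def get_historical_term_codes_alt (course_enrollment : List (List (String × String))) : List (String × List String) :=
  let terms := course_enrollment.map (fun e => (PySem.Dict.mk e).getD "term" "")
  [("fall", pvBucketAlt terms "09"),
   ("spring", pvBucketAlt terms "01"),
   ("summer", pvBucketAlt terms "05")]

-- ===== PRECONDITION & SPEC =====
-- Pre_ excludes exactly the inputs where some entry lacks the 'term' key: there Python A raises KeyError.
def Pre_get_historical_term_codes (course_enrollment : List (List (String × String))) : Prop :=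
  ∀ e ∈ course_enrollment, "term" ∈ e.map Prod.fst
instance (course_enrollment : List (List (String × String))) : Decidable (Pre_get_historical_term_codes course_enrollment) := by unfold Pre_get_historical_term_codes; infer_instance
def pvWitness_get_historical_term_codes : (List (List (String × String))) :=
  [[("term", "201909")], [("term", "201801")], [("term", "201909")]]
def Spec_get_historical_term_codes (course_enrollment : List (List (String × String))) (out : List (String × List String)) : Prop := out = get_historical_term_codes_alt course_enrollment
instance (course_enrollment : List (List (String × String))) (out : List (String × List String)) : Decidable (Spec_get_historical_term_codes course_enrollment out) := by unfold Spec_get_historical_term_codes; infer_instance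

-- ===== CLAIM =====
def Claim_equal_get_historical_term_codes : Prop := ∀ (course_enrollment : List (List (String × String))), Dom_get_historical_term_codes course_enrollment → Pre_get_historical_term_codes course_enrollment → Spec_get_historical_term_codes course_enrollment (get_historical_term_codes course_enrollment)

-- ===== LEMMAS AND PROOFS =====

-- two suffixes of the same string with equal length coincide
lemma suffix_unique {l1 l2 t : List Char} (h1 : l1 <:+ t) (h2 : l2 <:+ t)
    (h : l1.length = l2.length) : l1 = l2 := by
  obtain ⟨u, rfl⟩ := h1
  obtain ⟨v, hv⟩ := h2
  exact ((List.append_inj' hv h.symm).2).symm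

-- a string ending in one 2-char suffix cannot end in a different one
lemma endswith_excl {l1 l2 t : List Char}
    (hlen : l1.length = l2.length) (hne : l1 ≠ l2)
    (h1 : PySem.Chars.endswith t l1 = true) : PySem.Chars.endswith t l2 = false := by
  by_contra h
  have h2 : PySem.Chars.endswith t l2 = true := by
    cases hx : PySem.Chars.endswith t l2 <;> simp_all
  rw [PySem.Chars.endswith_iff] at h1 h2
  exact hne (suffix_unique h1 h2 hlen)

-- A's elif-chain loop, over abstract tests
lemma bucket_foldl {p q r : String → Bool} (ts : List String) (f s u : List String) :
    ts.foldl (fun acc t =>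
      if p t then (acc.1 ++ [t], acc.2.1, acc.2.2)
      else if q t then (acc.1, acc.2.1 ++ [t], acc.2.2)
      else if r t then (acc.1, acc.2.1, acc.2.2 ++ [t])
      else acc) (f, s, u) =
      (f ++ ts.filter p,
       s ++ ts.filter (fun t => !p t && q t),
       u ++ ts.filter (fun t => !p t && !q t && r t)) := by
  induction ts generalizing f s u with
  | nil => simp
  | cons t ts ih =>
    simp only [List.foldl_cons, List.filter_cons]
    by_cases h9 : p t <;> by_cases h1 : q t <;> by_cases h5 : r t <;>
      simp [h9, h1, h5, ih]

-- because the three suffixes are mutually exclusive, the elif guards reduce to plain tests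
lemma guard_spring : (fun t => !PySem.Str.endswith t "09" && PySem.Str.endswith t "01")
    = fun t => PySem.Str.endswith t "01" := by
  funext t
  simp only [PySem.Str.endswith_eq]
  cases h : PySem.Chars.endswith t.toList "01".toList with
  | false => simp
  | true => simp [endswith_excl (l1 := "01".toList) (l2 := ['0', '9']) (by decide) (by decide) h]

lemma guard_summer : (fun t => !PySem.Str.endswith t "09" && !PySem.Str.endswith t "01"
      && PySem.Str.endswith t "05") = fun t => PySem.Str.endswith t "05" := by
  funext t
  simp only [PySem.Str.endswith_eq]
  cases h : PySem.Chars.endswith t.toList "05".toList with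
  | false => simp
  | true =>
    simp [endswith_excl (l1 := "05".toList) (l2 := ['0', '9']) (by decide) (by decide) h,
      endswith_excl (l1 := "05".toList) (l2 := ['0', '1']) (by decide) (by decide) h]

-- ===== VERDICT =====
theorem get_historical_term_codes_spec : Claim_equal_get_historical_term_codes := by
  intro ce _ _
  unfold Spec_get_historical_term_codes get_historical_term_codes get_historical_term_codes_alt pvBucketAlt
  rw [show (fun acc (e : List (String × String)) =>
      let t := (PySem.Dict.mk e).getD "term" ""
      if PySem.Str.endswith t "09" then (acc.1 ++ [t], acc.2.1, acc.2.2)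
      else if PySem.Str.endswith t "01" then (acc.1, acc.2.1 ++ [t], acc.2.2)
      else if PySem.Str.endswith t "05" then (acc.1, acc.2.1, acc.2.2 ++ [t])
      else acc) = (fun acc e =>
      (fun acc t =>
        if PySem.Str.endswith t "09" then (acc.1 ++ [t], acc.2.1, acc.2.2)
        else if PySem.Str.endswith t "01" then (acc.1, acc.2.1 ++ [t], acc.2.2)
        else if PySem.Str.endswith t "05" then (acc.1, acc.2.1, acc.2.2 ++ [t])
        else acc) acc ((PySem.Dict.mk e).getD "term" "")) from rfl,
    ← List.foldl_map (f := fun e => (PySem.Dict.mk e).getD "term" "")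
      (g := fun acc t =>
        if PySem.Str.endswith t "09" then (acc.1 ++ [t], acc.2.1, acc.2.2)
        else if PySem.Str.endswith t "01" then (acc.1, acc.2.1 ++ [t], acc.2.2)
        else if PySem.Str.endswith t "05" then (acc.1, acc.2.1, acc.2.2 ++ [t])
        else acc)]
  simp only [bucket_foldl, List.nil_append, guard_spring, guard_summer]
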